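-- pv_equiv track=rewrite | github.com/Caimannn/Temperature-v2 | src/discord_bot/bot.py | _infer_city_from_text
-- ===== SOURCE A (Python) =====
-- PANEL_CITY_OPTIONS = ("nyc", "atlanta", "dallas", "chicago")
--
-- def _infer_city_from_text(text: str) -> str:
--     """Infer city key from free text for weather-market filtering."""
--
--     lowered = text.lower()
--     if "new york" in lowered or "nyc" in lowered or "central park" in lowered:
--         return "nyc"
--     for city in PANEL_CITY_OPTIONS:
--         if city in lowered:
--             return city
--     return "unknown"
-- ===== SOURCE B (Python) =====
-- # Position-driven multi-pattern scan: walk the text once over its suffixes,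
-- # recording every city whose keyword starts there, then pick by fixed priority.
-- _KEYWORD_CITY = (
--     ("new york", "nyc"),
--     ("nyc", "nyc"),
--     ("central park", "nyc"),
--     ("atlanta", "atlanta"),
--     ("dallas", "dallas"),
--     ("chicago", "chicago"),
-- )
-- _PRIORITY = ("nyc", "atlanta", "dallas", "chicago")
--
-- def _infer_city_from_text(text: str) -> str:
--     """Infer city key from free text for weather-market filtering."""
--     rest = text.lower()
--     found = set()
--     while rest:
--         for keyword, city in _KEYWORD_CITY:
--             if rest.startswith(keyword):
--                 found.add(city)
--         rest = rest[1:]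
--     for city in _PRIORITY:
--         if city in found:
--             return city
--     return "unknown"
-- ===== Notes on version B (the rewrite author's own statement) =====
-- stated objective: alternative
-- what changed: Instead of testing each keyword for substring containment with early return, B scans the lowered text position by position, collecting the set of all cities whose keyword starts at some position, and afterwards picks the first found city in fixed priority order.
import Mathlib
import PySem

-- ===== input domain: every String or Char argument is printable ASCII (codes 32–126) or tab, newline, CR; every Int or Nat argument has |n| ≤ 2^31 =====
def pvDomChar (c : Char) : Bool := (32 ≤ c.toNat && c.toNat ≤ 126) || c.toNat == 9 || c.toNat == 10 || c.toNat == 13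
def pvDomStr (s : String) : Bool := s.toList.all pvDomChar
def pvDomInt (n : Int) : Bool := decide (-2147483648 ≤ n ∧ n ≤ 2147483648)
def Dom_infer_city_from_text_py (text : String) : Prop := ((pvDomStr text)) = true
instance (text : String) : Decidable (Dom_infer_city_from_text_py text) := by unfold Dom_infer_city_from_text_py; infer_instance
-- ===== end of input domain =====

-- B replaces A's keyword-by-keyword substring tests (early return) with a single position-by-position
-- scan of the text collecting the set of all matched cities, then a priority pick (alternative algorithm, same cost).

-- ===== PORT A =====
-- module constant PANEL_CITY_OPTIONS
def panelCityOptions : List String := ["nyc", "atlanta", "dallas", "chicago"]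

-- A's 'for city in PANEL_CITY_OPTIONS' loop
def aCityLoop (cities : List String) (lowered : String) : String :=
  match cities with
  | [] => "unknown"
  | city :: rest => if PySem.Str.isIn city lowered then city else aCityLoop rest lowered

def infer_city_from_text_py (text : String) : String :=
  let lowered := PySem.Str.lower text
  if PySem.Str.isIn "new york" lowered || PySem.Str.isIn "nyc" lowered
      || PySem.Str.isIn "central park" lowered then "nyc"
  else aCityLoop panelCityOptions lowered

-- ===== PORT B =====
-- module constant _KEYWORD_CITY (keywords kept as char lists: B works on the text's characters)
def kwTable : List (List Char × String) :=
  [("new york".toList, "nyc"), ("nyc".toList, "nyc"), ("central park".toList, "nyc"),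
   ("atlanta".toList, "atlanta"), ("dallas".toList, "dallas"), ("chicago".toList, "chicago")]

-- module constant _PRIORITY
def priorityOrder : List String := ["nyc", "atlanta", "dallas", "chicago"]

-- the inner 'for keyword, city in _KEYWORD_CITY' pass at one position
def markAll (rest : List Char) (found : PySem.Set String) : PySem.Set String :=
  kwTable.foldl (fun f p => if PySem.Chars.startswith rest p.1 then PySem.Set.add f p.2 else f) found

-- the 'while rest: … ; rest = rest[1:]' loop (rest[1:] on a string is exactly the tail of its chars)
def scanSuffixes (rest : List Char) (found : PySem.Set String) : PySem.Set String :=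
  match rest with
  | [] => found
  | c :: tl => scanSuffixes tl (markAll (c :: tl) found)

-- the final 'for city in _PRIORITY' loop
def priorityPick (cities : List String) (found : PySem.Set String) : String :=
  match cities with
  | [] => "unknown"
  | city :: rest => if PySem.Set.contains found city then city else priorityPick rest found

def infer_city_from_text_py_alt (text : String) : String :=
  let found := scanSuffixes (PySem.Chars.lower text.toList) PySem.Set.empty
  priorityPick priorityOrder found

-- ===== PRECONDITION & SPEC =====
def Spec_infer_city_from_text_py (text : String) (out : String) : Prop := out = infer_city_from_text_py_alt text
instance (text : String) (out : String) : Decidable (Spec_infer_city_from_text_py text out) := by unfold Spec_infer_city_from_text_py; infer_instance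

-- ===== CLAIM (what is proved, stated in full; the proofs are below) =====
def Claim_equal_infer_city_from_text_py : Prop := ∀ (text : String), Dom_infer_city_from_text_py text → Spec_infer_city_from_text_py text (infer_city_from_text_py text)

-- ===== LEMMAS AND PROOFS =====

-- 'some keyword for city c starts at the head of s'
def hitAt (s : List Char) (c : String) : Prop :=
  ∃ p ∈ kwTable, p.1 <+: s ∧ p.2 = c

lemma mem_foldl_ifadd (tbl : List (List Char × String)) (s : List Char)
    (f : PySem.Set String) (c : String) :
    c ∈ tbl.foldl (fun f p => if PySem.Chars.startswith s p.1 then PySem.Set.add f p.2 else f) f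
      ↔ c ∈ f ∨ ∃ p ∈ tbl, p.1 <+: s ∧ p.2 = c := by
  induction tbl generalizing f with
  | nil => simp
  | cons p tl ih =>
      rw [List.foldl_cons, ih]
      by_cases h : p.1 <+: s
      · simp [(PySem.Chars.startswith_iff s p.1).mpr h, PySem.Set.mem_add, h]
        tauto
      · have : PySem.Chars.startswith s p.1 = false := by
          cases hb : PySem.Chars.startswith s p.1
          · rfl
          · exact absurd ((PySem.Chars.startswith_iff s p.1).mp hb) h
        simp [this, h]

lemma mem_markAll (s : List Char) (f : PySem.Set String) (c : String) :
    c ∈ markAll s f ↔ c ∈ f ∨ hitAt s c := by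
  unfold markAll hitAt
  exact mem_foldl_ifadd kwTable s f c

lemma hitAt_nil (c : String) : ¬ hitAt [] c := by
  unfold hitAt kwTable
  rintro ⟨p, hp, hpre, _⟩
  have : p.1 = [] := List.prefix_nil.mp hpre
  fin_cases hp <;> simp_all

lemma exists_drop_cons (P : List Char → Prop) (a : Char) (rest : List Char) :
    (∃ j, P ((a :: rest).drop j)) ↔ P (a :: rest) ∨ ∃ j, P (rest.drop j) := by
  constructor
  · rintro ⟨j, h⟩
    cases j with
    | zero => exact Or.inl h
    | succ j => exact Or.inr ⟨j, by simpa using h⟩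
  · rintro (h | ⟨j, h⟩)
    · exact ⟨0, h⟩
    · exact ⟨j + 1, by simpa using h⟩

lemma mem_scanSuffixes (s : List Char) (f : PySem.Set String) (c : String) :
    c ∈ scanSuffixes s f ↔ c ∈ f ∨ ∃ j, hitAt (s.drop j) c := by
  induction s generalizing f with
  | nil => simp [scanSuffixes, List.drop_nil, hitAt_nil c]
  | cons a tl ih =>
      rw [scanSuffixes, ih, mem_markAll, exists_drop_cons (fun l => hitAt l c)]
      tauto

lemma mem_found_iff (L : List Char) (c : String) :
    c ∈ scanSuffixes L PySem.Set.empty ↔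
      ∃ p ∈ kwTable, PySem.Chars.isIn p.1 L = true ∧ p.2 = c := by
  rw [mem_scanSuffixes]
  constructor
  · rintro (h | ⟨j, p, hp, hpre, hc⟩)
    · simp [PySem.Set.empty] at h
    · exact ⟨p, hp, (PySem.Chars.exists_prefix_drop_iff_isIn p.1 L).mp ⟨j, hpre⟩, hc⟩
  · rintro ⟨p, hp, hin, hc⟩
    obtain ⟨j, hpre⟩ := (PySem.Chars.exists_prefix_drop_iff_isIn p.1 L).mpr hin
    exact Or.inr ⟨j, p, hp, hpre, hc⟩

-- ===== VERDICT (by name: the statement is the Claim_ definition above) =====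
set_option maxHeartbeats 2000000 in
theorem infer_city_from_text_py_spec : Claim_equal_infer_city_from_text_py := by
  intro text _
  unfold Spec_infer_city_from_text_py infer_city_from_text_py infer_city_from_text_py_alt
    panelCityOptions priorityOrder
  have hcont : ∀ c : String,
      PySem.Set.contains (scanSuffixes (PySem.Chars.lower text.toList) PySem.Set.empty) c
        = true ↔ ∃ p ∈ kwTable, PySem.Chars.isIn p.1 (PySem.Chars.lower text.toList) = true ∧ p.2 = c := by
    intro c
    rw [PySem.Set.contains_iff, mem_found_iff]
  have hnyc := hcont "nyc"
  have hatl := hcont "atlanta"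
  have hdal := hcont "dallas"
  have hchi := hcont "chicago"
  unfold kwTable at hnyc hatl hdal hchi
  simp at hnyc hatl hdal hchi
  cases h1 : PySem.Chars.isIn "new york".toList (PySem.Chars.lower text.toList) <;>
  cases h2 : PySem.Chars.isIn "nyc".toList (PySem.Chars.lower text.toList) <;>
  cases h3 : PySem.Chars.isIn "central park".toList (PySem.Chars.lower text.toList) <;>
  cases h4 : PySem.Chars.isIn "atlanta".toList (PySem.Chars.lower text.toList) <;>
  cases h5 : PySem.Chars.isIn "dallas".toList (PySem.Chars.lower text.toList) <;>
  cases h6 : PySem.Chars.isIn "chicago".toList (PySem.Chars.lower text.toList) <;>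
    simp_all [aCityLoop, priorityPick]
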